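-- pv_equiv track=rewrite | github.com/hiLijinrong/MCNet | api.py | sort_by_occur_and_weights
-- ===== SOURCE A (Python) =====
-- from collections import defaultdict
--
-- def sort_by_occur_and_weights(elements, occur, weights):
--     # 根据节点损坏时间和权重进行重新排序
--     zipped = list(zip(elements, weights, occur))
--     groups = defaultdict(list)
--     for elem, weight, time in zipped:
--         groups[time].append((elem, weight))
--     sorted_groups = sorted(groups.items(), key=lambda x: x[0])
--     sorted_elements = []
--     for _, group in sorted_groups:
--         sorted_group = sorted(group, key=lambda x: x[1], reverse=True)
--         sorted_elements.extend([item[0] for item in sorted_group])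
--     return sorted_elements
-- ===== SOURCE B (Python) =====
-- def sort_by_occur_and_weights(elements, occur, weights):
--     # two chained stable sorts: weight descending, then time ascending
--     triples = list(zip(elements, weights, occur))
--     triples.sort(key=lambda t: t[1], reverse=True)
--     triples.sort(key=lambda t: t[2])
--     return [t[0] for t in triples]
-- ===== Notes on version B (the rewrite author's own statement) =====
-- stated objective: faster
-- what changed: Replaces the defaultdict grouping by time with per-group weight sorts by two chained stable in-place sorts (weight descending, then time ascending) on the zipped triples, relying on sort stability.
import Mathlib
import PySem

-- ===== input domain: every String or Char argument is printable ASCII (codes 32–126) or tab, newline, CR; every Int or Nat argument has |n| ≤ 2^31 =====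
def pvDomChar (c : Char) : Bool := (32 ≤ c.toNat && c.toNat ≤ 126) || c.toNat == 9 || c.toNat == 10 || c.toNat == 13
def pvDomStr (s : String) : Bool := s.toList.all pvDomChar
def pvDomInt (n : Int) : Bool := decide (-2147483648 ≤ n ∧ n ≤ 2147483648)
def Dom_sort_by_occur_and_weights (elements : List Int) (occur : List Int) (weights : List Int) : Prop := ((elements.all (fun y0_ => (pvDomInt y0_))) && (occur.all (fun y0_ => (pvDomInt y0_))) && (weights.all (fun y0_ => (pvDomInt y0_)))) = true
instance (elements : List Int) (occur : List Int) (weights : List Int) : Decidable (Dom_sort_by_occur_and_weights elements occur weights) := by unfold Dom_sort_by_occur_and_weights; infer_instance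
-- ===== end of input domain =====

-- B replaces A's time-grouping dict with per-group weight sorts by two chained stable sorts (weight desc, then time asc); simpler, same return value.

-- ===== PORT A =====
def sort_by_occur_and_weights (elements : List Int) (occur : List Int) (weights : List Int) : List Int :=
  let zipped : List (Int × Int × Int) := elements.zip (weights.zip occur)
  let groups : PySem.Dict Int (List (Int × Int)) :=
    zipped.foldl (fun d x => d.modify x.2.2 [] (fun l => l ++ [(x.1, x.2.1)])) PySem.Dict.empty
  let sorted_groups := PySem.List.sorted groups.items (fun p => p.1) false
  sorted_groups.foldl
    (fun acc p => acc ++ (PySem.List.sorted p.2 (fun q => q.2) true).map (fun q => q.1)) []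

-- ===== PORT B =====
def sort_by_occur_and_weights_alt (elements : List Int) (occur : List Int) (weights : List Int) : List Int :=
  let triples : List (Int × Int × Int) := elements.zip (weights.zip occur)
  let s1 := PySem.List.sorted triples (fun t => t.2.1) true
  let s2 := PySem.List.sorted s1 (fun t => t.2.2) false
  s2.map (fun t => t.1)

-- ===== PRECONDITION & SPEC =====
def Spec_sort_by_occur_and_weights (elements : List Int) (occur : List Int) (weights : List Int) (out : List Int) : Prop := out = sort_by_occur_and_weights_alt elements occur weights
instance (elements : List Int) (occur : List Int) (weights : List Int) (out : List Int) : Decidable (Spec_sort_by_occur_and_weights elements occur weights out) := by unfold Spec_sort_by_occur_and_weights; infer_instance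

-- ===== CLAIM (what is proved, stated in full; the proofs are below) =====
def Claim_equal_sort_by_occur_and_weights : Prop := ∀ (elements : List Int) (occur : List Int) (weights : List Int), Dom_sort_by_occur_and_weights elements occur weights → Spec_sort_by_occur_and_weights elements occur weights (sort_by_occur_and_weights elements occur weights)

-- ===== LEMMAS AND PROOFS =====

-- insertBy passes over a prefix it does not insert before
theorem pv_insertBy_append_left {α : Type} (B : α → α → Bool) (x : α) (l1 l2 : List α)
    (h : ∀ y ∈ l1, B x y = false) :
    PySem.List.insertBy B x (l1 ++ l2) = l1 ++ PySem.List.insertBy B x l2 := by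
  induction l1 with
  | nil => simp
  | cons y ys ih =>
    rw [List.cons_append, PySem.List.insertBy.eq_def]
    simp only [h y (by simp)]
    simp only [Bool.false_eq_true, if_false, List.cons_append]
    rw [ih (fun z hz => h z (by simp [hz]))]

-- insertBy puts x in front when x goes before everything
theorem pv_insertBy_eq_cons {α : Type} (B : α → α → Bool) (x : α) (l : List α)
    (h : ∀ y ∈ l, B x y = true) :
    PySem.List.insertBy B x l = x :: l := by
  cases l with
  | nil => rfl
  | cons y ys => rw [PySem.List.insertBy.eq_def]; simp [h y (by simp)]

-- insertBy commutes with map when the comparison factors through the map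
theorem pv_insertBy_map {α β : Type} (B : β → β → Bool) (B' : α → α → Bool) (f : α → β)
    (h : ∀ a b, B (f a) (f b) = B' a b) (x : α) (ys : List α) :
    PySem.List.insertBy B (f x) (ys.map f) = (PySem.List.insertBy B' x ys).map f := by
  induction ys with
  | nil => rfl
  | cons y ys ih =>
    rw [List.map_cons, PySem.List.insertBy.eq_def, PySem.List.insertBy.eq_def]
    simp only [h x y]
    by_cases hb : B' x y
    · simp [hb]
    · simp [hb, ih]

theorem pv_foldl_insertBy_map {α β : Type} (B : β → β → Bool) (B' : α → α → Bool) (f : α → β)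
    (h : ∀ a b, B (f a) (f b) = B' a b) :
    ∀ (l : List α) (acc : List α),
      List.foldl (fun acc x => PySem.List.insertBy B x acc) (acc.map f) (l.map f)
        = (List.foldl (fun acc x => PySem.List.insertBy B' x acc) acc l).map f := by
  intro l
  induction l with
  | nil => intro acc; rfl
  | cons x xs ih =>
    intro acc
    simp only [List.map_cons, List.foldl_cons]
    rw [pv_insertBy_map B B' f h, ih]

-- stable reverse sort commutes with map
theorem pv_sorted_map_rev {α β : Type} (f : α → β) (key : β → Int) (l : List α) :
    PySem.List.sorted (l.map f) key true = (PySem.List.sorted l (fun x => key (f x)) true).map f := by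
  rw [PySem.List.sorted_rev_eq_foldl_insertBy, PySem.List.sorted_rev_eq_foldl_insertBy]
  have := pv_foldl_insertBy_map (fun a b => decide (key b < key a))
    (fun a b => decide (key (f b) < key (f a))) f (fun a b => rfl) l []
  simpa using this

-- inserting into a weight-descending list keeps it weight-descending
theorem pv_insertBy_pairwise_ge {α : Type} (key : α → Int) (x : α) (l : List α)
    (h : l.Pairwise (fun a b => key b ≤ key a)) :
    (PySem.List.insertBy (fun a b => decide (key b < key a)) x l).Pairwise
      (fun a b => key b ≤ key a) := by
  induction l with
  | nil => simp [PySem.List.insertBy.eq_def]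
  | cons y ys ih =>
    rw [PySem.List.insertBy.eq_def]
    rcases List.pairwise_cons.mp h with ⟨hy, hys⟩
    by_cases hb : key y < key x
    · simp only [decide_eq_true_eq, hb, if_true]
      refine List.pairwise_cons.mpr ⟨?_, h⟩
      intro z hz
      rcases List.mem_cons.mp hz with rfl | hz
      · exact le_of_lt hb
      · exact le_trans (hy z hz) (le_of_lt hb)
    · simp only [decide_eq_true_eq, hb, if_false]
      refine List.pairwise_cons.mpr ⟨?_, ih hys⟩
      intro z hz
      rcases (PySem.List.mem_insertBy _ x z ys).mp hz with rfl | hz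
      · omega
      · exact hy z hz

-- filtering commutes with inserting into a weight-descending list
theorem pv_filter_insertBy {α : Type} (key : α → Int) (p : α → Bool) (x : α) (l : List α)
    (h : l.Pairwise (fun a b => key b ≤ key a)) :
    (PySem.List.insertBy (fun a b => decide (key b < key a)) x l).filter p
      = if p x then PySem.List.insertBy (fun a b => decide (key b < key a)) x (l.filter p)
        else l.filter p := by
  induction l with
  | nil => by_cases hp : p x <;> simp [PySem.List.insertBy.eq_def, List.filter, hp]
  | cons y ys ih =>
    rcases List.pairwise_cons.mp h with ⟨hy, hys⟩
    rw [PySem.List.insertBy.eq_def]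
    by_cases hb : key y < key x
    · simp only [decide_eq_true_eq, hb, if_true]
      by_cases hp : p x
      · have hall : ∀ z ∈ (y :: ys).filter p, (fun a b => decide (key b < key a)) x z = true := by
          intro z hz
          have hz' := List.mem_of_mem_filter hz
          rcases List.mem_cons.mp hz' with rfl | hz'
          · simp [hb]
          · simp; exact lt_of_le_of_lt (hy z hz') hb
        rw [pv_insertBy_eq_cons _ x _ hall]
        simp [hp]
      · simp [hp]
    · simp only [decide_eq_true_eq, hb, if_false]
      by_cases hpy : p y
      · rw [List.filter_cons_of_pos hpy, List.filter_cons_of_pos hpy, ih hys]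
        by_cases hp : p x
        · simp only [hp, if_true]
          conv_rhs => rw [PySem.List.insertBy.eq_def]
          simp [hb]
        · simp [hp]
      · rw [List.filter_cons_of_neg hpy, List.filter_cons_of_neg hpy, ih hys]

theorem pv_filter_foldl_insertBy {α : Type} (key : α → Int) (p : α → Bool) :
    ∀ (l acc : List α), acc.Pairwise (fun a b => key b ≤ key a) →
      (List.foldl (fun acc x => PySem.List.insertBy (fun a b => decide (key b < key a)) x acc) acc l).filter p
        = List.foldl (fun acc x => PySem.List.insertBy (fun a b => decide (key b < key a)) x acc)
            (acc.filter p) (l.filter p) := by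
  intro l
  induction l with
  | nil => intro acc _; rfl
  | cons x xs ih =>
    intro acc hacc
    simp only [List.foldl_cons]
    rw [ih _ (pv_insertBy_pairwise_ge key x acc hacc), pv_filter_insertBy key p x acc hacc]
    by_cases hp : p x
    · rw [List.filter_cons_of_pos hp]; simp [hp]
    · rw [List.filter_cons_of_neg hp]; simp [hp]

-- filtering commutes with the stable reverse sort
theorem pv_filter_sorted_rev {α : Type} (key : α → Int) (p : α → Bool) (xs : List α) :
    (PySem.List.sorted xs key true).filter p = PySem.List.sorted (xs.filter p) key true := by
  rw [PySem.List.sorted_rev_eq_foldl_insertBy, PySem.List.sorted_rev_eq_foldl_insertBy]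
  simpa using pv_filter_foldl_insertBy key p xs [] (by simp)

-- inserting a covered element into a flatMap of key-homogeneous groups appends it to its group
theorem pv_insertBy_flatMap {α : Type} (key : α → Int) (x : α) :
    ∀ (ks : List Int) (g : Int → List α),
      ks.Pairwise (· < ·) →
      (∀ t ∈ ks, ∀ y ∈ g t, key y = t) →
      key x ∈ ks →
      PySem.List.insertBy (fun a b => decide (key a < key b)) x (ks.flatMap g)
        = ks.flatMap (fun t => g t ++ if t = key x then [x] else []) := by
  intro ks
  induction ks with
  | nil => intro g _ _ hx; simp at hx
  | cons k ks ih =>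
    intro g hks hg hx
    rcases List.pairwise_cons.mp hks with ⟨hk, hks'⟩
    simp only [List.flatMap_cons]
    rcases List.mem_cons.mp hx with hxk | hxk
    · -- key x = k : append at end of the first group, before all later groups
      have h1 : ∀ y ∈ g k, (fun a b => decide (key a < key b)) x y = false := by
        intro y hy
        have := hg k (by simp) y hy
        simp [this, hxk]
      rw [pv_insertBy_append_left _ x _ _ h1]
      have h2 : ∀ y ∈ ks.flatMap g, (fun a b => decide (key a < key b)) x y = true := by
        intro y hy
        rcases List.mem_flatMap.mp hy with ⟨t, ht, hyt⟩
        have := hg t (by simp [ht]) y hyt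
        have hkt := hk t ht
        simp [this, hxk]; omega
      rw [pv_insertBy_eq_cons _ x _ h2]
      have h3 : ks.flatMap (fun t => g t ++ if t = key x then [x] else []) = ks.flatMap g := by
        apply List.flatMap_congr
        intro t ht
        have : t ≠ key x := by have := hk t ht; omega
        simp [this]
      rw [h3, if_pos hxk.symm]
      simp
    · -- key x in a later group : skip the first group
      have hkx : k < key x := hk _ hxk
      have h1 : ∀ y ∈ g k, (fun a b => decide (key a < key b)) x y = false := by
        intro y hy
        have := hg k (by simp) y hy
        simp [this]; omega
      rw [pv_insertBy_append_left _ x _ _ h1]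
      rw [ih g hks' (fun t ht => hg t (by simp [ht])) hxk]
      have : k ≠ key x := by omega
      rw [if_neg this]
      simp

-- the stable ascending sort is the concatenation of the key groups in increasing key order
theorem pv_sorted_eq_flatMap_filter {α : Type} (key : α → Int) (xs : List α) (ks : List Int)
    (hks : ks.Pairwise (· < ·)) (hcov : ∀ y ∈ xs, key y ∈ ks) :
    PySem.List.sorted xs key false
      = ks.flatMap (fun t => xs.filter (fun y => key y == t)) := by
  induction xs using List.reverseRecOn with
  | nil =>
    have h0 : List.flatMap (fun t => List.filter (fun y => key y == t) ([] : List α)) ks = [] := by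
      simp
    rw [h0]
    rfl
  | append_singleton xs x ih =>
    rw [PySem.List.sorted_eq_foldl_insertBy, List.foldl_append]
    simp only [List.foldl_cons, List.foldl_nil]
    rw [← PySem.List.sorted_eq_foldl_insertBy]
    rw [ih (fun y hy => hcov y (by simp [hy]))]
    rw [pv_insertBy_flatMap key x ks (fun t => xs.filter (fun y => key y == t)) hks
      (fun t _ y hy => by simpa using (List.of_mem_filter hy))
      (hcov x (by simp))]
    apply List.flatMap_congr
    intro t _
    rw [List.filter_append]
    congr 1
    by_cases h : key x = t
    · subst h; simp [List.filter]
    · have h' : ¬ (t = key x) := fun hh => h hh.symm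
      have hb : (key x == t) = false := by simp [h]
      simp [List.filter, hb, h']

-- the grouping dict built by A, characterised: keys in first-occurrence order, values the
-- (element, weight) pairs of that time in original order
theorem pv_find_assoc {ν : Type} (g : Int → ν) (K : List Int) (k : Int)
    (hfind : List.find? (fun t => t == k) K = some k) :
    List.find? (fun p => p.1 == k) (K.map (fun t => (t, g t))) = some (k, g k) := by
  rw [List.find?_map]
  have hc : ((fun (p : Int × ν) => p.1 == k) ∘ fun t => (t, g t)) = fun t => t == k := rfl
  rw [hc, hfind]
  rfl

theorem pv_build_items :
    ∀ (xs done : List (Int × Int × Int)),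
      (List.foldl (fun d x => d.modify x.2.2 [] (fun l => l ++ [(x.1, x.2.1)]))
        (PySem.Dict.mk ((PySem.Set.ofList (done.map (fun y => y.2.2))).map
          (fun t => (t, (done.filter (fun y => y.2.2 == t)).map (fun y => (y.1, y.2.1)))))) xs).items
      = (PySem.Set.ofList ((done ++ xs).map (fun y => y.2.2))).map
          (fun t => (t, ((done ++ xs).filter (fun y => y.2.2 == t)).map (fun y => (y.1, y.2.1)))) := by
  intro xs
  induction xs with
  | nil => intro done; simp
  | cons x xs ih =>
    intro done
    simp only [List.foldl_cons]
    have hstep :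
        (PySem.Dict.mk ((PySem.Set.ofList (done.map (fun y => y.2.2))).map
          (fun t => (t, (done.filter (fun y => y.2.2 == t)).map (fun y => (y.1, y.2.1)))))).modify
            x.2.2 [] (fun l => l ++ [(x.1, x.2.1)])
        = PySem.Dict.mk ((PySem.Set.ofList ((done ++ [x]).map (fun y => y.2.2))).map
          (fun t => (t, ((done ++ [x]).filter (fun y => y.2.2 == t)).map (fun y => (y.1, y.2.1))))) := by
      set K := PySem.Set.ofList (done.map (fun y => y.2.2)) with hK
      have hK' : PySem.Set.ofList ((done ++ [x]).map (fun y => y.2.2)) = PySem.Set.add K x.2.2 := by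
        simp [PySem.Set.ofList, PySem.Set.empty, hK]
      by_cases hmem : x.2.2 ∈ K
      · -- existing time: value updated in place, key order unchanged
        have hcont : (PySem.Dict.mk (K.map
            (fun t => (t, (done.filter (fun y => y.2.2 == t)).map (fun y => (y.1, y.2.1)))))).contains x.2.2 = true := by
          simp [PySem.Dict.contains, List.any_map, Function.comp]
          exact hmem
        have hfind : List.find? (fun t => t == x.2.2) K = some x.2.2 := by
          cases hf : List.find? (fun t => t == x.2.2) K with
          | none =>
            exfalso
            have := List.find?_eq_none.mp hf x.2.2 hmem
            simp at this
          | some t0 =>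
            have := List.find?_some hf
            simp at this
            simp [this]
        have hget : (PySem.Dict.mk (K.map
            (fun t => (t, (done.filter (fun y => y.2.2 == t)).map (fun y => (y.1, y.2.1)))))).getD x.2.2 []
            = (done.filter (fun y => y.2.2 == x.2.2)).map (fun y => (y.1, y.2.1)) := by
          rw [PySem.Dict.getD, PySem.Dict.get?]
          rw [pv_find_assoc (fun t => (done.filter (fun y => y.2.2 == t)).map (fun y => (y.1, y.2.1))) K x.2.2 hfind]
          rfl
        rw [PySem.Dict.modify, hget, PySem.Dict.insert, hcont]
        simp only [if_true]
        have hKadd : PySem.Set.add K x.2.2 = K := by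
          simp [PySem.Set.add, PySem.Set.contains]
          exact hmem
        rw [hK', hKadd]
        congr 1
        rw [List.map_map]
        apply List.map_congr_left
        intro t _
        by_cases ht : t = x.2.2
        · subst ht
          simp [List.filter_append, List.filter]
        · have : ¬ (t == x.2.2) = true := by simp [ht]
          simp only [Function.comp]
          rw [if_neg this]
          have hx : (x.2.2 == t) = false := by simp; exact fun h => ht h.symm
          simp [List.filter_append, List.filter, hx]
      · -- new time: appended at the end
        have hcont : (PySem.Dict.mk (K.map
            (fun t => (t, (done.filter (fun y => y.2.2 == t)).map (fun y => (y.1, y.2.1)))))).contains x.2.2 = false := by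
          simp [PySem.Dict.contains, List.any_map, Function.comp]
          intro t ht h
          exact absurd (h ▸ ht) hmem
        have hget : (PySem.Dict.mk (K.map
            (fun t => (t, (done.filter (fun y => y.2.2 == t)).map (fun y => (y.1, y.2.1)))))).getD x.2.2 []
            = [] := by
          rw [PySem.Dict.getD, PySem.Dict.get?]
          rw [List.find?_map]
          rw [List.find?_eq_none.mpr]
          · rfl
          · intro t ht
            simp only [Function.comp]
            simp
            intro h
            exact absurd (h ▸ ht) hmem
        rw [PySem.Dict.modify, hget, PySem.Dict.insert]
        rw [PySem.Dict.contains] at hcont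
        simp only [PySem.Dict.contains, hcont]
        simp only [Bool.false_eq_true, if_false]
        rw [hK']
        have hKadd : PySem.Set.add K x.2.2 = K ++ [x.2.2] := by
          simp [PySem.Set.add, PySem.Set.contains]
          exact hmem
        rw [hKadd]
        have hnil : done.filter (fun y => y.2.2 == x.2.2) = [] := by
          rw [List.filter_eq_nil_iff]
          intro y hy h
          simp at h
          exact hmem (by rw [← h]; exact (PySem.Set.mem_ofList _ _).mpr (List.mem_map_of_mem hy))
        rw [List.map_append]
        have h1 : List.map (fun t => (t, (done.filter (fun y => y.2.2 == t)).map (fun y => (y.1, y.2.1)))) K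
            = List.map (fun t => (t, ((done ++ [x]).filter (fun y => y.2.2 == t)).map (fun y => (y.1, y.2.1)))) K := by
          apply List.map_congr_left
          intro t ht
          have htx : (x.2.2 == t) = false := by
            simp
            intro h
            exact hmem (h ▸ ht)
          simp [List.filter_append, List.filter, htx]
        rw [← h1]
        congr 1
        simp [List.filter_append, List.filter, hnil]
    rw [hstep]
    have := ih (done ++ [x])
    rw [this]
    simp

-- ===== VERDICT (by name: the statement is the Claim_ definition above) =====
theorem sort_by_occur_and_weights_spec : Claim_equal_sort_by_occur_and_weights := by
  intro elements occur weights _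
  unfold Spec_sort_by_occur_and_weights sort_by_occur_and_weights sort_by_occur_and_weights_alt
  show (List.foldl (fun acc p => acc ++ (PySem.List.sorted p.2 (fun q => q.2) true).map (fun q => q.1)) []
      (PySem.List.sorted (List.foldl (fun d x => d.modify x.2.2 [] fun l => l ++ [(x.1, x.2.1)])
        PySem.Dict.empty (elements.zip (weights.zip occur))).items (fun p => p.1) false))
    = (PySem.List.sorted (PySem.List.sorted (elements.zip (weights.zip occur)) (fun t => t.2.1) true)
        (fun t => t.2.2) false).map (fun t => t.1)
  set zipped : List (Int × Int × Int) := elements.zip (weights.zip occur) with hz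
  set K : List Int := PySem.Set.ofList (zipped.map (fun y => y.2.2)) with hKdef
  set ks : List Int := PySem.List.sorted K (fun t => t) false with hks
  set f : Int → Int × List (Int × Int) :=
    (fun t => (t, (zipped.filter (fun y => y.2.2 == t)).map (fun y => (y.1, y.2.1)))) with hf
  have hksP : ks.Pairwise (· < ·) := PySem.List.sorted_ofList_pairwise_lt _
  -- A's dict items
  have hitems :
      (zipped.foldl (fun d x => d.modify x.2.2 [] (fun l => l ++ [(x.1, x.2.1)]))
        PySem.Dict.empty).items = K.map f := by
    have := pv_build_items zipped []
    simpa [PySem.Dict.empty, PySem.Set.ofList, PySem.Set.empty] using this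
  -- A's sorted group list
  have hsg : PySem.List.sorted (zipped.foldl
        (fun d x => d.modify x.2.2 [] (fun l => l ++ [(x.1, x.2.1)])) PySem.Dict.empty).items
        (fun p => p.1) false = ks.map f := by
    rw [hitems]
    apply PySem.List.sorted_eq_of_perm_of_pairwise_lt
    · exact (PySem.List.sorted_perm K (fun t => t) false).map f
    · rw [List.pairwise_map]
      simpa [hf] using hksP
  rw [hsg, PySem.List.foldl_append_eq_flatMap, List.nil_append, List.flatMap_map]
  -- B's outer sort as a flatMap over ks
  have hcov : ∀ y ∈ PySem.List.sorted zipped (fun t => t.2.1) true, (fun (y : Int × Int × Int) => y.2.2) y ∈ ks := by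
    intro y hy
    have hy' : y ∈ zipped := (PySem.List.mem_sorted _ _ _ _).mp hy
    rw [hks, PySem.List.mem_sorted]
    exact (PySem.Set.mem_ofList _ _).mpr (List.mem_map_of_mem hy')
  rw [pv_sorted_eq_flatMap_filter (fun (y : Int × Int × Int) => y.2.2) (PySem.List.sorted zipped (fun t => t.2.1) true) ks hksP hcov]
  rw [List.map_flatMap]
  apply List.flatMap_congr
  intro t _
  rw [pv_filter_sorted_rev (fun y => y.2.1) (fun y => y.2.2 == t) zipped]
  simp only [hf]
  rw [pv_sorted_map_rev (fun (y : Int × Int × Int) => (y.1, y.2.1)) (fun q => q.2) (List.filter (fun y => y.2.2 == t) zipped)]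
  rw [List.map_map]
  rfl
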